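-- pv_equiv track=rewrite | github.com/erichschroeter/sc | stylecheck/lang/c/whitespace.py | check
-- ===== SOURCE A (Python) =====
-- import string
--
-- def check(text):
-- 	if len(text) < 1:
-- 		return True
-- 	if text[0] not in string.whitespace:
-- 		return True
-- 	whitespace_char = text[0]
-- 	# Strip whitespace to find first non-whitespace char
-- 	stripped = text.strip()
-- 	if len(stripped) < 1:
-- 		return True
-- 	first_non_whitespace = stripped[0]
-- 	for i, c in enumerate(text):
-- 		if c == first_non_whitespace:
-- 			return True
-- 		if c != whitespace_char:
-- 			break
-- 	return False
-- ===== SOURCE B (Python) =====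
-- import string
--
-- def check(text):
--     if not text or text[0] not in string.whitespace:
--         return True
--     rest = text.lstrip(text[0])
--     return not rest.strip() or rest[0] not in string.whitespace
-- ===== Notes on version B (the rewrite author's own statement) =====
-- stated objective: simpler
-- what changed: A computes text.strip() to find the first non-whitespace char and then runs an enumerate loop comparing each char against it; B instead peels the homogeneous leading run with text.lstrip(text[0]) and decides by one whitespace-membership test on the next character, with no scan loop.
import Mathlib
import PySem

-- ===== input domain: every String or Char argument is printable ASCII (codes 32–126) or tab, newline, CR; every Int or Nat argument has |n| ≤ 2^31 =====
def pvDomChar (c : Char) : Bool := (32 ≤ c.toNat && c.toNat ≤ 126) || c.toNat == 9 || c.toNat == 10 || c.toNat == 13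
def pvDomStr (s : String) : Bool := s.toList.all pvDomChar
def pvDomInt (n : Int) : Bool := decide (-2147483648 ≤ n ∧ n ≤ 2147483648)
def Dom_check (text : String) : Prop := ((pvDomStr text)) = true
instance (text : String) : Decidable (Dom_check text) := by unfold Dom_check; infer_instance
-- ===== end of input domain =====

-- B replaces A's strip()+first-non-whitespace scan loop with one lstrip(text[0]) prefix peel and a
-- single whitespace-membership test on the next character (objective: simpler decomposition).

-- ===== PORT A =====
-- string.whitespace, as a list of its characters (membership test only)
def wsChars : List Char := [' ', '\t', '\n', '\r', Char.ofNat 11, Char.ofNat 12]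

-- the `for i, c in enumerate(text)` loop: return True on first_non_whitespace, break (→ False) on a
-- char differing from whitespace_char, fall through (→ False) at the end
def checkLoop (fnw wch : Char) : List Char → Bool
  | [] => false
  | c :: rest => if c == fnw then true else if c != wch then false else checkLoop fnw wch rest

def check (text : String) : Bool :=
  match text.toList with
  | [] => true                                           -- len(text) < 1
  | wch :: t =>
    if !(wsChars.contains wch) then true                 -- text[0] not in string.whitespace
    else
      match PySem.Chars.strip (wch :: t) with            -- stripped = text.strip()
      | [] => true                                       -- len(stripped) < 1
      | fnw :: _ => checkLoop fnw wch (wch :: t)         -- first_non_whitespace = stripped[0]; loop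

-- ===== PORT B =====
def check_alt (text : String) : Bool :=
  match text.toList with
  | [] => true                                           -- not text
  | wch :: t =>
    if !(wsChars.contains wch) then true                 -- text[0] not in string.whitespace
    else
      -- rest = text.lstrip(text[0]): drop the maximal leading run of text[0] (exact port of str.lstrip(ch))
      match (wch :: t).dropWhile (· == wch) with
      | [] => true                                       -- rest == "" ⇒ rest.strip() empty ⇒ Python short-circuits True before rest[0]
      | r :: rs => (PySem.Chars.strip (r :: rs)).isEmpty || !(wsChars.contains r)
                                                         -- not rest.strip() or rest[0] not in string.whitespace

-- ===== PRECONDITION & SPEC =====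
def Spec_check (text : String) (out : Bool) : Prop := out = check_alt text
instance (text : String) (out : Bool) : Decidable (Spec_check text out) := by unfold Spec_check; infer_instance

-- ===== CLAIM (what is proved, stated in full; the proofs are below) =====
def Claim_equal_check : Prop := ∀ (text : String), Dom_check text → Spec_check text (check text)

-- ===== LEMMAS AND PROOFS =====

-- every char of string.whitespace is isspace
lemma ws_mem_isspace {c : Char} (h : wsChars.contains c = true) : PySem.Chars.isspace c = true := by
  simp only [wsChars, List.contains_eq_mem, List.mem_cons, List.not_mem_nil, or_false,
    decide_eq_true_eq] at h
  rcases h with h | h | h | h | h | h <;> subst h <;> decide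

-- within the domain, an isspace char is one of the six string.whitespace chars
lemma dom_isspace_mem {c : Char} (hd : pvDomChar c = true) (h : PySem.Chars.isspace c = true) :
    wsChars.contains c = true := by
  simp only [pvDomChar, Bool.or_eq_true, Bool.and_eq_true, decide_eq_true_eq, beq_iff_eq] at hd
  simp only [PySem.Chars.isspace, Bool.or_eq_true, Bool.and_eq_true, decide_eq_true_eq] at h
  have hval : c.toNat = 32 ∨ c.toNat = 9 ∨ c.toNat = 10 ∨ c.toNat = 11 ∨ c.toNat = 12 ∨ c.toNat = 13 := by
    omega
  simp only [wsChars, List.contains_eq_mem, List.mem_cons, List.not_mem_nil, or_false,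
    decide_eq_true_eq]
  have hinj : ∀ d : Char, c.toNat = d.toNat → c = d := fun d hcd => Char.ext (UInt32.toNat_inj.mp hcd)
  rcases hval with h1 | h1 | h1 | h1 | h1 | h1
  · exact Or.inl (hinj ' ' h1)
  · exact Or.inr (Or.inl (hinj '\t' h1))
  · exact Or.inr (Or.inr (Or.inl (hinj '\n' h1)))
  · exact Or.inr (Or.inr (Or.inr (Or.inr (Or.inl (hinj (Char.ofNat 11) h1)))))
  · exact Or.inr (Or.inr (Or.inr (Or.inr (Or.inr (hinj (Char.ofNat 12) h1)))))
  · exact Or.inr (Or.inr (Or.inr (Or.inl (hinj '\r' h1))))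

-- A's loop, characterised: it runs through the leading run of wch (never hitting fnw ≠ wch) and
-- decides on the first différent char
lemma loop_run (fnw wch : Char) (hne : fnw ≠ wch) (cs : List Char) :
    checkLoop fnw wch cs =
      match cs.dropWhile (· == wch) with
      | [] => false
      | r :: _ => r == fnw := by
  induction cs with
  | nil => simp [checkLoop]
  | cons c cs ih =>
    by_cases hc : c = wch
    · subst hc
      have h1 : (c == fnw) = false := by simp [Ne.symm hne]
      simp [checkLoop, List.dropWhile_cons, h1, ih]
    · simp only [checkLoop, List.dropWhile_cons]
      have h2 : (c == wch) = false := by simp [hc]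
      simp [h2]
      by_cases h3 : c = fnw <;> simp [h3, hc]

-- dropping the leading wch-run first does not change lstrip, when wch is whitespace
lemma dw_dw {wch : Char} (hws : PySem.Chars.isspace wch = true) (cs : List Char) :
    (cs.dropWhile (· == wch)).dropWhile PySem.Chars.isspace = cs.dropWhile PySem.Chars.isspace := by
  induction cs with
  | nil => rfl
  | cons c cs ih =>
    by_cases hc : c = wch
    · subst hc; simpa [List.dropWhile_cons, hws] using ih
    · simp [List.dropWhile_cons, hc]

-- rstrip keeps a non-whitespace head
lemma rstrip_cons {f : Char} (hf : PySem.Chars.isspace f = false) (l : List Char) :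
    PySem.Chars.rstrip (f :: l) = f :: PySem.Chars.rstrip l := by
  simp only [PySem.Chars.rstrip, List.reverse_cons, List.dropWhile_append]
  split_ifs with h
  · simp only [List.isEmpty_iff] at h
    simp [List.dropWhile_cons, hf, h]
  · simp only [List.isEmpty_iff] at h
    simp [List.reverse_append]

-- the first char surviving dropWhile fails the predicate
lemma head_dropWhile {p : Char → Bool} : ∀ {l x : _} {xs : List Char}, List.dropWhile p l = x :: xs → p x = false := by
  intro l
  induction l with
  | nil => intro x xs h; cases h
  | cons c cs ih =>
    intro x xs h
    rw [List.dropWhile_cons] at h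
    by_cases hc : p c = true
    · rw [if_pos hc] at h; exact ih h
    · rw [if_neg hc] at h
      cases h
      exact Bool.eq_false_iff.mpr hc

-- ===== VERDICT (by name: the statement is the Claim_ definition above) =====
theorem check_spec : Claim_equal_check := by
  unfold Claim_equal_check
  intro text hDom
  unfold Spec_check check check_alt
  have hdom : ∀ c ∈ text.toList, pvDomChar c = true := by
    simpa [Dom_check, pvDomStr, List.all_eq_true] using hDom
  cases hcs : text.toList with
  | nil => rfl
  | cons wch t =>
    by_cases hw : wsChars.contains wch = true
    · have hws : PySem.Chars.isspace wch = true := ws_mem_isspace hw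
      simp only [hw, Bool.not_true, Bool.false_eq_true, if_false]
      have hdd := dw_dw hws (wch :: t)
      cases hL : List.dropWhile PySem.Chars.isspace (wch :: t) with
      | nil =>
        have hstrip : PySem.Chars.strip (wch :: t) = [] := by
          simp [PySem.Chars.strip, PySem.Chars.lstrip, hL, PySem.Chars.rstrip]
        rw [hstrip]
        cases hrest : List.dropWhile (fun c => c == wch) (wch :: t) with
        | nil => rfl
        | cons r rs =>
          rw [hrest, hL] at hdd
          have hstrip2 : PySem.Chars.strip (r :: rs) = [] := by
            simp [PySem.Chars.strip, PySem.Chars.lstrip, hdd, PySem.Chars.rstrip]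
          simp [hstrip2]
      | cons f L' =>
        have hf : PySem.Chars.isspace f = false := head_dropWhile hL
        have hstrip : PySem.Chars.strip (wch :: t) = f :: PySem.Chars.rstrip L' := by
          simp [PySem.Chars.strip, PySem.Chars.lstrip, hL, rstrip_cons hf]
        rw [hstrip]
        have hne : f ≠ wch := by
          intro h; rw [h, hws] at hf; cases hf
        refine Eq.trans (loop_run f wch hne (wch :: t)) ?_
        cases hrest : List.dropWhile (fun c => c == wch) (wch :: t) with
        | nil =>
          rw [hrest, hL] at hdd
          cases hdd
        | cons r rs =>
          rw [hrest, hL] at hdd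
          have hstrip2 : PySem.Chars.strip (r :: rs) = f :: PySem.Chars.rstrip L' := by
            simp [PySem.Chars.strip, PySem.Chars.lstrip, hdd, rstrip_cons hf]
          simp only [hstrip2, List.isEmpty_cons, Bool.false_or]
          have hrmem : pvDomChar r = true := by
            have hmem : r ∈ List.dropWhile (fun c => c == wch) (wch :: t) := by
              rw [hrest]; exact List.mem_cons_self ..
            exact hdom r (by rw [hcs]; exact (List.dropWhile_sublist _).subset hmem)
          by_cases hr : PySem.Chars.isspace r = true
          · have hcr : wsChars.contains r = true := dom_isspace_mem hrmem hr
            have hrf : r ≠ f := by intro h; rw [h, hf] at hr; cases hr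
            have hmem : r ∈ wsChars := by simpa [List.contains_eq_mem] using hcr
            simp [hrf, hmem]
          · have hdw : List.dropWhile PySem.Chars.isspace (r :: rs) = r :: rs := by
              simp [List.dropWhile_cons, Bool.eq_false_iff.mpr hr]
            rw [hdw] at hdd
            have hrf : r = f := (List.cons.injEq _ _ _ _ ▸ hdd).1
            have hcr : wsChars.contains r = false := by
              cases hc2 : wsChars.contains r with
              | false => rfl
              | true => exact absurd (ws_mem_isspace hc2) hr
            have hmem : r ∉ wsChars := by simpa [List.contains_eq_mem] using hcr
            simp [hrf, hrf ▸ hmem]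
    · have hw' : wsChars.contains wch = false := by
        cases h : wsChars.contains wch with
        | false => rfl
        | true => exact absurd h hw
      have hmem : wch ∉ wsChars := by simpa [List.contains_eq_mem] using hw'
      simp [hmem]
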